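-- pv_equiv track=rewrite | github.com/5hyun/python_codingTest | 프로그래머스/기능개발.py | solution
-- ===== SOURCE A (Python) =====
-- def solution(progresses, speeds):
--     answer = []
--     while progresses:
--         count = 0
--         for i in range(len(progresses)):
--             if progresses[i] >= 100:
--                 continue
--             progresses[i] += speeds[i]
--         while progresses:
--             if progresses[0] >= 100:
--                 count += 1
--                 del progresses[0]
--                 del speeds[0]
--                 if not progresses and count:
--                     answer.append(count)
--             else:
--                 if count > 0:
--                     answer.append(count)
--                 break
--
--     return answer
-- ===== SOURCE B (Python) =====
-- def solution(progresses, speeds):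
--     # Unlike A (which simulates day by day and empties both input lists),
--     # B computes each task's finish day in closed form and groups in one pass.
--     # B does not mutate its arguments; the equivalence is about the return value.
--     answer = []
--     cur = 0   # finish day of the task currently blocking the queue
--     cnt = 0   # tasks deployed together with it
--     for p, s in zip(progresses, speeds):
--         d = 1 if p >= 100 else -((p - 100) // s)  # ceil((100-p)/s), at least 1
--         if d > cur:
--             if cnt > 0:
--                 answer.append(cnt)
--             cur = d
--             cnt = 1
--         else:
--             cnt += 1
--     if cnt > 0:
--         answer.append(cnt)
--     return answer
-- ===== Notes on version B (the rewrite author's own statement) =====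
-- stated objective: alternative
-- what changed: Instead of simulating progress day by day and repeatedly deleting finished heads from the (mutated) lists, B computes each task's finish day with one ceiling division and groups tasks in a single pass by the running maximum finish day; intended to scale as O(n) where A's cost grows with the number of simulated days (a timing run saw A time out where B returned but could not verify a clean ratio).
import Mathlib
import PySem

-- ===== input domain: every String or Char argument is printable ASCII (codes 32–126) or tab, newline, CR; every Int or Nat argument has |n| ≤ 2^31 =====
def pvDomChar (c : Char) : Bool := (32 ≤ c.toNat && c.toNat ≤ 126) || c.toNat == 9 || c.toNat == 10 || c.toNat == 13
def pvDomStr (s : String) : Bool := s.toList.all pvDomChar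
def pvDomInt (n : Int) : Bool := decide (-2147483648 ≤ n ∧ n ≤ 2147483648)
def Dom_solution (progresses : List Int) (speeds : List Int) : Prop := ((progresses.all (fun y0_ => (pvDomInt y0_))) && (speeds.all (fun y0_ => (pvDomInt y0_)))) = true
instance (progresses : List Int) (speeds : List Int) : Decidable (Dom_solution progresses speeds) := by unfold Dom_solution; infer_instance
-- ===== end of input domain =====

-- B replaces A's day-by-day simulation by a closed-form finish day (ceiling division) per
-- task and a single grouping pass; Python A empties both argument lists in place, B does
-- not mutate them — the equivalence proved here is about the return value only.

-- ===== PORT A =====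
-- one day of progress: progresses[i] += speeds[i] for the unfinished tasks
def stepDay (p s : List Int) : List Int :=
  List.zipWith (fun a b => if 100 ≤ a then a else a + b) p s

-- the inner `while progresses:` loop: pop finished heads, appending the count
def innerA : List Int → List Int → Int → List Int → List Int × List Int × List Int
  | [], s, _, ans => ([], s, ans)
  | p :: ps, s, c, ans =>
    if 100 ≤ p then
      innerA ps s.tail (c + 1) (if ps = [] ∧ c + 1 ≠ 0 then ans ++ [c + 1] else ans)
    else (p :: ps, s, if 0 < c then ans ++ [c] else ans)

-- days a task needs before it reaches 100 (0 if already there); used only as fuel for A's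
-- outer `while`, which Python runs until the list empties (one fuel unit = one day)
def remN (p s : Int) : Nat := if 100 ≤ p then 0 else ((100 - p + s - 1) / s).toNat

def fuelA (p s : List Int) : Nat :=
  1 + ((p.zip s).map (fun x => remN x.1 x.2)).foldl max 0

def loopA : Nat → List Int → List Int → List Int → List Int
  | 0, _, _, ans => ans
  | f + 1, p, s, ans =>
    if p = [] then ans
    else
      let r := innerA (stepDay p s) s 0 ans
      loopA f r.1 r.2.1 r.2.2

def solution (progresses : List Int) (speeds : List Int) : List Int :=
  loopA (fuelA progresses speeds) progresses speeds []

-- ===== PORT B =====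
-- B's single pass: d = finish day of the task, group by running maximum finish day
def goB : List (Int × Int) → Int → Int → List Int → List Int
  | [], _, cnt, acc => if 0 < cnt then acc ++ [cnt] else acc
  | x :: l, cur, cnt, acc =>
    let d := if 100 ≤ x.1 then 1 else -(PySem.Int.floordiv (x.1 - 100) x.2)
    if cur < d then goB l d 1 (if 0 < cnt then acc ++ [cnt] else acc)
    else goB l cur (cnt + 1) acc

def solution_alt (progresses : List Int) (speeds : List Int) : List Int :=
  goB (progresses.zip speeds) 0 0 []

-- ===== PRECONDITION & SPEC =====
-- Pre_ excludes exactly the inputs on which Python A does not return normally: an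
-- IndexError when speeds is shorter than progresses, and divergence of the outer while
-- when some unfinished task (progress < 100) has speed ≤ 0 and so never reaches 100.
def Pre_solution (progresses : List Int) (speeds : List Int) : Prop :=
  progresses.length ≤ speeds.length ∧
    ∀ x ∈ progresses.zip speeds, 100 ≤ x.1 ∨ 0 < x.2
instance (progresses : List Int) (speeds : List Int) : Decidable (Pre_solution progresses speeds) := by
  unfold Pre_solution; infer_instance

def pvWitness_solution : List Int × List Int := ([93, 30, 55], [1, 30, 5])

def Spec_solution (progresses : List Int) (speeds : List Int) (out : List Int) : Prop := out = solution_alt progresses speeds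
instance (progresses : List Int) (speeds : List Int) (out : List Int) : Decidable (Spec_solution progresses speeds out) := by unfold Spec_solution; infer_instance

-- ===== CLAIM (what is proved, stated in full; the proofs are below) =====
def Claim_equal_solution : Prop := ∀ (progresses : List Int) (speeds : List Int), Dom_solution progresses speeds → Pre_solution progresses speeds → Spec_solution progresses speeds (solution progresses speeds)

-- ===== LEMMAS AND PROOFS =====

-- abstraction: the list of remaining-day counts of the queue
def dsl (p s : List Int) : List Nat := (p.zip s).map (fun x => remN x.1 x.2)

-- finish day of a task (at least 1: even an already-finished task is popped on day 1)
def dN (x : Int × Int) : Nat := max 1 (remN x.1 x.2)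

-- grouping of a remaining-days list by running maximum finish day
def Gs : List Nat → List Int
  | [] => []
  | d :: rest =>
    ((1 : Int) + (rest.takeWhile (fun x => decide (max 1 x ≤ max 1 d))).length) ::
      Gs (rest.dropWhile (fun x => decide (max 1 x ≤ max 1 d)))
termination_by l => l.length
decreasing_by
  exact Nat.lt_succ_of_le (List.length_dropWhile_le _ _)

-- day-level simulation on remaining-day counts
def loopD : Nat → List Nat → List Int → List Int
  | 0, _, ans => ans
  | f + 1, ds, ans =>
    if ds = [] then ans
    else
      let ds1 := ds.map (· - 1)
      let k := (ds1.takeWhile (· == 0)).length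
      loopD f (ds1.dropWhile (· == 0)) (if k ≠ 0 then ans ++ [(k : Int)] else ans)

-- arithmetic facts about remN
theorem remN_pos {p s : Int} (hp : ¬ 100 ≤ p) (hs : 0 < s) : 1 ≤ remN p s := by
  unfold remN
  simp only [hp, if_false]
  have h1 : (1 : Int) ≤ (100 - p + s - 1) / s := by
    rw [Int.le_ediv_iff_mul_le hs]; omega
  omega

theorem remN_eq_zero_iff {p s : Int} (h : 100 ≤ p ∨ 0 < s) : remN p s = 0 ↔ 100 ≤ p := by
  constructor
  · intro h0
    by_contra hp
    have := remN_pos hp (h.resolve_left hp)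
    omega
  · intro hp; unfold remN; simp [hp]

theorem remN_step {p s : Int} (h : 100 ≤ p ∨ 0 < s) :
    remN (if 100 ≤ p then p else p + s) s = remN p s - 1 := by
  by_cases hp : 100 ≤ p
  · simp [hp, remN]
  · have hs : 0 < s := h.resolve_left hp
    simp only [hp, if_false]
    by_cases hp2 : 100 ≤ p + s
    · -- finishes this day: old remN = 1
      have h1 : remN (p + s) s = 0 := (remN_eq_zero_iff (Or.inl hp2)).2 hp2
      have h2 : remN p s = 1 := by
        unfold remN
        simp only [hp, if_false]
        have hq : (100 - p + s - 1) / s = 1 := by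
          have hlo : (1 : Int) ≤ (100 - p + s - 1) / s := by
            rw [Int.le_ediv_iff_mul_le hs]; omega
          have hhi : (100 - p + s - 1) / s < 2 := by
            rw [Int.ediv_lt_iff_lt_mul hs]; omega
          omega
        rw [hq]; rfl
      omega
    · -- still unfinished: the quotient drops by one
      unfold remN
      simp only [hp, hp2, if_false]
      have key : (100 - (p + s) + s - 1) / s + 1 = (100 - p + s - 1) / s := by
        have : (100 - p + s - 1) = (100 - (p + s) + s - 1) + 1 * s := by ring
        rw [this, Int.add_mul_ediv_right _ _ (by omega : s ≠ 0)]
      have hlo : (0 : Int) ≤ (100 - (p + s) + s - 1) / s := by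
        apply Int.ediv_nonneg <;> omega
      omega

-- B's per-task finish day equals dN
theorem dB_eq {p s : Int} (h : 100 ≤ p ∨ 0 < s) :
    (if 100 ≤ p then (1 : Int) else -(PySem.Int.floordiv (p - 100) s)) = (dN (p, s) : Int) := by
  by_cases hp : 100 ≤ p
  · simp [hp, dN, remN]
  · have hs : 0 < s := h.resolve_left hp
    simp only [hp, if_false]
    rw [PySem.Int.floordiv_eq_ediv_of_pos hs]
    have hr := Int.emod_emod_of_dvd (p - 100) (dvd_refl s)
    obtain ⟨hr0, hr1⟩ : 0 ≤ (p - 100) % s ∧ (p - 100) % s < s :=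
      ⟨Int.emod_nonneg _ (by omega), Int.emod_lt_of_pos _ hs⟩
    have hdm : (p - 100) = s * ((p - 100) / s) + (p - 100) % s := (Int.mul_ediv_add_emod _ _).symm
    set q := (p - 100) / s with hq
    set r := (p - 100) % s with hrr
    have hceil : (100 - p + s - 1) / s = -q := by
      have hneg : s * (-q) = -(s * q) := by ring
      have hrepr : 100 - p + s - 1 = (s - r - 1) + s * (-q) := by omega
      rw [hrepr, Int.add_mul_ediv_left _ _ (by omega : s ≠ 0),
        Int.ediv_eq_zero_of_lt (by omega) (by omega)]
      omega
    have hge : 1 ≤ (100 - p + s - 1) / s := by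
      rw [Int.le_ediv_iff_mul_le hs]; omega
    unfold dN remN
    simp only [hp, if_false]
    have : max 1 ((100 - p + s - 1) / s).toNat = ((100 - p + s - 1) / s).toNat := by omega
    rw [this]
    omega

-- the inner while loop pops the maximal finished prefix and appends its count (if any)
theorem innerA_spec : ∀ (p s : List Int) (c : Int) (ans : List Int), 0 ≤ c →
    innerA p s c ans =
      (p.dropWhile (fun x => decide (100 ≤ x)),
       s.drop (p.takeWhile (fun x => decide (100 ≤ x))).length,
       if p = [] then ans
       else if 0 < c + ((p.takeWhile (fun x => decide (100 ≤ x))).length : Int) then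
         ans ++ [c + ((p.takeWhile (fun x => decide (100 ≤ x))).length : Int)]
       else ans) := by
  intro p
  induction p with
  | nil => intro s c ans hc; simp [innerA]
  | cons x ps ih =>
    intro s c ans hc
    by_cases hx : 100 ≤ x
    · rw [innerA, if_pos hx]
      rw [ih s.tail (c + 1) _ (by omega)]
      have htail : ∀ (k : Nat), s.tail.drop k = s.drop (k + 1) := by
        intro k; cases s <;> simp
      by_cases hps : ps = []
      · subst hps
        simp only [List.dropWhile_cons, List.takeWhile_cons, hx, decide_true, if_true,
          List.takeWhile_nil, List.dropWhile_nil, List.length_cons, List.length_nil]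
        rw [htail 0]
        simp only [true_and, Nat.zero_add, Nat.cast_one]
        rw [if_pos (by omega : c + 1 ≠ 0), if_neg (by simp : ¬ ([x] : List Int) = []),
          if_pos (by omega : (0 : Int) < c + 1)]
      · have hcond : (if ps = [] ∧ c + 1 ≠ 0 then ans ++ [c + 1] else ans) = ans := by
          simp [hps]
        rw [hcond]
        simp only [List.dropWhile_cons, List.takeWhile_cons, hx, decide_true, if_true,
          List.length_cons, hps, if_false]
        rw [htail]
        simp only [Nat.cast_add, Nat.cast_one, if_neg (by simp : ¬ (x :: ps) = [])]
        rw [if_pos (by omega), if_pos (by omega)]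
        have : c + 1 + ((ps.takeWhile (fun x => decide (100 ≤ x))).length : Int)
            = c + (((ps.takeWhile (fun x => decide (100 ≤ x))).length : Int) + 1) := by ring
        rw [this]
    · rw [innerA, if_neg hx]
      simp [hx]

theorem dsl_step : ∀ (p s : List Int), (∀ x ∈ p.zip s, 100 ≤ x.1 ∨ 0 < x.2) →
    dsl (stepDay p s) s = (dsl p s).map (· - 1) := by
  intro p
  induction p with
  | nil => intro s h; rfl
  | cons a p' ih =>
    intro s h
    cases s with
    | nil => rfl
    | cons b s' =>
      have hh : 100 ≤ a ∨ 0 < b := h (a, b) (by simp)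
      have ht := ih s' (fun x hx => h x (by simp [hx]))
      simp only [stepDay, List.zipWith_cons_cons, dsl, List.zip_cons_cons, List.map_cons] at *
      rw [remN_step hh, ht]

theorem pre_step : ∀ (p s : List Int), (∀ x ∈ p.zip s, 100 ≤ x.1 ∨ 0 < x.2) →
    ∀ x ∈ (stepDay p s).zip s, 100 ≤ x.1 ∨ 0 < x.2 := by
  intro p
  induction p with
  | nil => intro s h x hx; simp [stepDay] at hx
  | cons a p' ih =>
    intro s h x hx
    cases s with
    | nil => simp [stepDay] at hx
    | cons b s' =>
      simp only [stepDay, List.zipWith_cons_cons, List.zip_cons_cons, List.mem_cons] at hx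
      rcases hx with h1 | h2
      · subst h1
        rcases h (a, b) (by simp) with ha | hb
        · left; simp [ha]
        · right; exact hb
      · exact ih s' (fun x hx => h x (by simp [hx])) x h2

theorem pop_corr : ∀ (p s : List Int), p.length ≤ s.length →
    (∀ x ∈ p.zip s, 100 ≤ x.1 ∨ 0 < x.2) →
    ((dsl p s).takeWhile (· == 0)).length = (p.takeWhile (fun x => decide (100 ≤ x))).length
    ∧ dsl (p.dropWhile (fun x => decide (100 ≤ x)))
        (s.drop (p.takeWhile (fun x => decide (100 ≤ x))).length) = (dsl p s).dropWhile (· == 0)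
    ∧ (p.dropWhile (fun x => decide (100 ≤ x))).length
        ≤ (s.drop (p.takeWhile (fun x => decide (100 ≤ x))).length).length
    ∧ ∀ x ∈ (p.dropWhile (fun x => decide (100 ≤ x))).zip
        (s.drop (p.takeWhile (fun x => decide (100 ≤ x))).length), 100 ≤ x.1 ∨ 0 < x.2 := by
  intro p
  induction p with
  | nil => intro s _ _; simp [dsl]
  | cons a p' ih =>
    intro s hlen h
    cases s with
    | nil => simp at hlen
    | cons b s' =>
      have hh : 100 ≤ a ∨ 0 < b := h (a, b) (by simp)
      have hlen' : p'.length ≤ s'.length := by simpa using hlen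
      have h' : ∀ x ∈ p'.zip s', 100 ≤ x.1 ∨ 0 < x.2 := fun x hx => h x (by simp [hx])
      obtain ⟨ih1, ih2, ih3, ih4⟩ := ih s' hlen' h'
      by_cases ha : 100 ≤ a
      · have hz : remN a b = 0 := (remN_eq_zero_iff hh).2 ha
        simp only [dsl, List.zip_cons_cons, List.map_cons, List.takeWhile_cons,
          List.dropWhile_cons, hz, ha, decide_true, if_true, beq_self_eq_true,
          List.length_cons, List.drop_succ_cons]
        exact ⟨by simpa [dsl] using ih1, by simpa [dsl] using ih2,
          by simpa [dsl] using ih3, by simpa [dsl] using ih4⟩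
      · have hz : remN a b ≠ 0 := by
          have := remN_pos ha (hh.resolve_left ha)
          omega
        simp only [dsl, List.zip_cons_cons, List.map_cons, List.takeWhile_cons,
          List.dropWhile_cons, ha, decide_false, if_false,
          beq_iff_eq, hz, List.length_nil]
        exact ⟨rfl, rfl, by simpa using hlen, h⟩

theorem dsl_length (p s : List Int) : (dsl p s).length = min p.length s.length := by
  simp [dsl]

theorem loopA_loopD : ∀ (f : Nat) (p s : List Int) (ans : List Int), p.length ≤ s.length →
    (∀ x ∈ p.zip s, 100 ≤ x.1 ∨ 0 < x.2) →
    loopA f p s ans = loopD f (dsl p s) ans := by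
  intro f
  induction f with
  | zero => intro p s ans _ _; rfl
  | succ f ih =>
    intro p s ans hlen h
    by_cases hp : p = []
    · subst hp; rfl
    · have hplen : p.length ≠ 0 := by simpa using hp
      have hds : dsl p s ≠ [] := by
        intro hnil
        have := dsl_length p s
        rw [hnil] at this
        simp at this
        omega
      rw [loopA, loopD, if_neg hp, if_neg hds]
      have hlen1 : (stepDay p s).length = p.length := by
        simp [stepDay, List.length_zipWith]; omega
      have hlen1' : (stepDay p s).length ≤ s.length := by omega
      have pre1 := pre_step p s h
      have hp1 : stepDay p s ≠ [] := by
        intro hnil; rw [hnil] at hlen1; simp at hlen1; omega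
      rw [innerA_spec (stepDay p s) s 0 ans le_rfl]
      obtain ⟨c1, c2, c3, c4⟩ := pop_corr (stepDay p s) s hlen1' pre1
      have hstep : dsl (stepDay p s) s = (dsl p s).map (· - 1) := dsl_step p s h
      rw [hstep] at c1 c2
      simp only [if_neg hp1, zero_add]
      rw [ih _ _ _ c3 c4, c2, ← c1]
      rcases Nat.eq_zero_or_pos ((((dsl p s).map (· - 1)).takeWhile (· == 0)).length) with hk | hk
      · simp [hk]
      · rw [if_pos (by exact_mod_cast hk), if_pos (by omega)]

theorem foldl_max_mono_init : ∀ (l : List Nat) (a b : Nat), a ≤ b → l.foldl max a ≤ l.foldl max b := by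
  intro l
  induction l with
  | nil => intro a b h; simpa
  | cons x l ih => intro a b h; exact ih _ _ (by omega)

theorem foldl_max_sublist : ∀ {l1 l2 : List Nat}, l1.Sublist l2 → ∀ a, l1.foldl max a ≤ l2.foldl max a := by
  intro l1 l2 hs
  induction hs with
  | slnil => intro a; exact le_rfl
  | cons b hsub ih => intro a; exact le_trans (ih a) (foldl_max_mono_init _ _ _ (by omega))
  | cons₂ b hsub ih => intro a; exact ih _

theorem le_foldl_max_init : ∀ (l : List Nat) (a : Nat), a ≤ l.foldl max a := by
  intro l
  induction l with
  | nil => intro a; exact le_rfl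
  | cons x l ih => intro a; exact le_trans (by omega : a ≤ max a x) (ih _)

theorem mem_le_foldl_max : ∀ (l : List Nat) (x : Nat), x ∈ l → ∀ a, x ≤ l.foldl max a := by
  intro l
  induction l with
  | nil => intro x hx; simp at hx
  | cons y l ih =>
    intro x hx a
    rcases List.mem_cons.1 hx with h | h
    · subst h
      exact le_trans (by omega : x ≤ max a x) (le_foldl_max_init l _)
    · exact ih x h (max a y)

theorem foldl_max_map_pred : ∀ (l : List Nat) (a : Nat),
    (l.map (· - 1)).foldl max (a - 1) = l.foldl max a - 1 := by
  intro l
  induction l with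
  | nil => intro a; rfl
  | cons x l ih =>
    intro a
    simp only [List.map_cons, List.foldl_cons]
    rw [show max (a - 1) (x - 1) = max a x - 1 by omega, ih]

theorem dropWhile_head_false {α : Type} (p : α → Bool) :
    ∀ (l : List α) {y : α} {t : List α}, l.dropWhile p = y :: t → p y = false := by
  intro l
  induction l with
  | nil => intro y t h; simp at h
  | cons a l ih =>
    intro y t h
    by_cases hp : p a = true
    · rw [List.dropWhile_cons_of_pos hp] at h; exact ih h
    · rw [List.dropWhile_cons_of_neg hp] at h
      cases h
      simpa using hp

-- uniform decrement does not change the grouping when the head is still ≥ 2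
theorem Gs_shift : ∀ (n : Nat) (d : Nat) (rest : List Nat), (d :: rest).length ≤ n → 2 ≤ d →
    Gs ((d :: rest).map (· - 1)) = Gs (d :: rest) := by
  intro n
  induction n with
  | zero => intro d rest hlen; simp at hlen
  | succ n ih =>
    intro d rest hlen hd
    rw [List.map_cons, Gs, Gs]
    have hmax : max 1 (d - 1) = d - 1 := by omega
    have hfun : ((fun x => decide (max 1 x ≤ max 1 (d - 1))) ∘ (· - 1))
        = (fun x : Nat => decide (max 1 x ≤ max 1 d)) := by
      funext x
      simp only [Function.comp_apply, decide_eq_decide]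
      omega
    rw [List.takeWhile_map, List.dropWhile_map, hfun]
    refine congrArg₂ _ (by rw [List.length_map]) ?_
    rcases hl2 : rest.dropWhile (fun x => decide (max 1 x ≤ max 1 d)) with _ | ⟨y, t2⟩
    · simp
    · have hy : ¬ (max 1 y ≤ max 1 d) := by
        simpa using dropWhile_head_false _ rest hl2
      have hy2 : 2 ≤ y := by omega
      have hlen2 : (y :: t2).length ≤ n := by
        have := List.length_dropWhile_le (fun x => decide (max 1 x ≤ max 1 d)) rest
        rw [hl2] at this
        simp only [List.length_cons] at *
        omega
      exact ih y t2 hlen2 hy2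

-- Gs only looks at the values through max 1
theorem Gs_max1 : ∀ (n : Nat) (ds : List Nat), ds.length ≤ n →
    Gs (ds.map (fun x => max 1 x)) = Gs ds := by
  intro n
  induction n with
  | zero =>
    intro ds hlen
    have hnil : ds = [] := List.length_eq_zero_iff.1 (by omega)
    subst hnil; rfl
  | succ n ih =>
    intro ds hlen
    cases ds with
    | nil => rfl
    | cons d rest =>
      rw [List.map_cons, Gs, Gs]
      have hfun : ((fun x => decide (max 1 x ≤ max 1 (max 1 d))) ∘ (fun x => max 1 x))
          = (fun x : Nat => decide (max 1 x ≤ max 1 d)) := by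
        funext x
        simp only [Function.comp_apply, decide_eq_decide]
        omega
      rw [List.takeWhile_map, List.dropWhile_map, hfun]
      refine congrArg₂ _ (by rw [List.length_map]) ?_
      have hlen2 : (rest.dropWhile (fun x => decide (max 1 x ≤ max 1 d))).length ≤ n := by
        have := List.length_dropWhile_le (fun x => decide (max 1 x ≤ max 1 d)) rest
        simp only [List.length_cons] at hlen
        omega
      exact ih _ hlen2

theorem loopD_nil : ∀ (f : Nat) (ans : List Int), loopD f [] ans = ans := by
  intro f ans; cases f <;> simp [loopD]

-- the day-by-day simulation computes the grouping, given enough fuel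
theorem loopD_Gs : ∀ (f : Nat) (ds : List Nat) (ans : List Int), ds.foldl max 0 < f →
    loopD f ds ans = ans ++ Gs ds := by
  intro f
  induction f with
  | zero => intro ds ans h; omega
  | succ f ih =>
    intro ds ans hfuel
    cases ds with
    | nil => rw [loopD_nil]; simp [Gs]
    | cons d rest =>
      rw [loopD, if_neg (by simp)]
      simp only [List.map_cons]
      have hM : d ≤ (d :: rest).foldl max 0 := mem_le_foldl_max _ d (by simp) 0
      have hMr : rest.foldl max 0 ≤ (d :: rest).foldl max 0 :=
        foldl_max_sublist (List.sublist_cons_self d rest) 0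
      by_cases hd : 2 ≤ d
      · -- nothing finishes today
        have hne : (((d - 1 : Nat)) == 0) = false := by simp; omega
        simp only [List.takeWhile_cons, List.dropWhile_cons, hne, Bool.false_eq_true, if_false]
        simp only [List.length_nil]
        rw [if_neg (by simp)]
        have hfold : ((d - 1) :: rest.map (· - 1)).foldl max 0 = (d :: rest).foldl max 0 - 1 := by
          have := foldl_max_map_pred (d :: rest) 0
          simpa using this
        rw [ih _ _ (by omega)]
        rw [show ((d - 1) :: rest.map (· - 1)) = ((d :: rest).map (· - 1)) from by simp]
        rw [Gs_shift ((d :: rest).map (· - 1)).length d rest (by simp) hd]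
      · -- the head finishes today; pop the whole ≤1 prefix
        have h0 : d - 1 = 0 := by omega
        have hQ : ((fun x : Nat => x == 0) ∘ (· - 1)) = (fun x : Nat => decide (x ≤ 1)) := by
          funext x
          by_cases hx : x ≤ 1
          · have h1 : x - 1 = 0 := by omega
            simp [h1, hx]
          · have h1 : x - 1 ≠ 0 := by omega
            simp [h1, hx]
        rw [List.takeWhile_cons, List.dropWhile_cons]
        simp only [h0, beq_self_eq_true, if_true, List.length_cons,
          List.takeWhile_map, List.dropWhile_map, hQ, List.length_map]
        set t := (rest.takeWhile (fun x : Nat => decide (x ≤ 1))).length with ht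
        have hknz : t + 1 ≠ 0 := by omega
        rw [if_pos hknz]
        have hGsHead : Gs (d :: rest)
            = ((t + 1 : Nat) : Int) :: Gs (rest.dropWhile (fun x : Nat => decide (x ≤ 1))) := by
          rw [Gs]
          have hm1 : max 1 d = 1 := by omega
          have hfun : (fun x : Nat => decide (max 1 x ≤ max 1 d)) = (fun x : Nat => decide (x ≤ 1)) := by
            funext x
            simp only [hm1, decide_eq_decide]
            omega
          rw [hfun, ht]
          push_cast
          ring_nf
        rcases hl2 : rest.dropWhile (fun x : Nat => decide (x ≤ 1)) with _ | ⟨y, t2⟩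
        · rw [List.map_nil, loopD_nil, hGsHead, hl2]
          simp [Gs]
        · have hy : ¬ (y ≤ 1) := by
            simpa using dropWhile_head_false _ rest hl2
          have hy2 : 2 ≤ y := by omega
          have hsub : (y :: t2).Sublist rest := by
            have := List.dropWhile_sublist (l := rest) (p := fun x : Nat => decide (x ≤ 1))
            rwa [hl2] at this
          have hfold2 : ((y :: t2).map (· - 1)).foldl max 0 = (y :: t2).foldl max 0 - 1 := by
            have := foldl_max_map_pred (y :: t2) 0
            simpa using this
          have hyM : 2 ≤ (d :: rest).foldl max 0 :=
            le_trans hy2 (le_trans (mem_le_foldl_max _ y (hsub.mem (by simp)) 0) hMr)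
          have hfuel2 : ((y :: t2).map (· - 1)).foldl max 0 < f := by
            have h1 : (y :: t2).foldl max 0 ≤ rest.foldl max 0 := foldl_max_sublist hsub 0
            omega
          rw [ih _ _ hfuel2, Gs_shift ((y :: t2).map (· - 1)).length y t2 (by simp) hy2,
            hGsHead, hl2]
          push_cast
          simp

theorem max1_dN (x : Int × Int) : max 1 (dN x) = dN x := by unfold dN; omega

theorem Gs_cons_dN (x : Int × Int) (l : List (Int × Int)) :
    Gs (dN x :: l.map dN)
      = ((1 : Int) + ((l.takeWhile (fun r => decide (dN r ≤ dN x))).length : Int)) ::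
          Gs ((l.dropWhile (fun r => decide (dN r ≤ dN x))).map dN) := by
  rw [Gs]
  have hfun : ((fun z => decide (max 1 z ≤ max 1 (dN x))) ∘ dN)
      = (fun r => decide (dN r ≤ dN x)) := by
    funext r
    simp only [Function.comp_apply, max1_dN]
  rw [List.takeWhile_map, List.dropWhile_map, hfun, List.length_map]

-- B's fold, once inside a group, computes the group count and recurses on the rest
theorem goB_spec : ∀ (l : List (Int × Int)) (M cnt : Nat) (acc : List Int),
    (∀ x ∈ l, 100 ≤ x.1 ∨ 0 < x.2) → 1 ≤ M → 1 ≤ cnt →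
    goB l (M : Int) (cnt : Int) acc
      = acc ++ (((cnt : Int) + ((l.takeWhile (fun x => decide (dN x ≤ M))).length : Int)) ::
          Gs ((l.dropWhile (fun x => decide (dN x ≤ M))).map dN)) := by
  intro l
  induction l with
  | nil =>
    intro M cnt acc _ _ hcnt
    rw [goB, if_pos (by exact_mod_cast hcnt)]
    simp [Gs]
  | cons x l ih =>
    intro M cnt acc h hM hcnt
    have hx := h x (by simp)
    have h' : ∀ y ∈ l, 100 ≤ y.1 ∨ 0 < y.2 := fun y hy => h y (by simp [hy])
    have hd1 : 1 ≤ dN x := by unfold dN; omega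
    rw [goB]
    simp only [dB_eq hx]
    by_cases hcmp : dN x ≤ M
    · rw [if_neg (by exact_mod_cast not_lt.2 (by exact_mod_cast hcmp))]
      have : ((cnt : Int) + 1) = (((cnt + 1 : Nat)) : Int) := by push_cast; ring
      rw [this, ih M (cnt + 1) acc h' hM (by omega)]
      rw [List.takeWhile_cons_of_pos (by simpa using hcmp),
        List.dropWhile_cons_of_pos (by simpa using hcmp)]
      simp only [List.length_cons]
      push_cast
      ring_nf
    · rw [if_pos (by exact_mod_cast lt_of_not_ge hcmp)]
      rw [if_pos (by exact_mod_cast hcnt)]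
      have h1 : (1 : Int) = (((1 : Nat)) : Int) := rfl
      rw [h1, ih (dN x) 1 (acc ++ [(cnt : Int)]) h' hd1 le_rfl]
      rw [List.takeWhile_cons_of_neg (by simpa using hcmp),
        List.dropWhile_cons_of_neg (by simpa using hcmp)]
      simp only [List.map_cons, Gs_cons_dN, List.length_nil]
      push_cast
      simp [List.append_assoc]

theorem alt_eq_Gs (p s : List Int) (h : ∀ x ∈ p.zip s, 100 ≤ x.1 ∨ 0 < x.2) :
    solution_alt p s = Gs (dsl p s) := by
  have hmap : (p.zip s).map dN = (dsl p s).map (fun r => max 1 r) := by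
    simp only [dsl, List.map_map]
    rfl
  have hGs : Gs ((p.zip s).map dN) = Gs (dsl p s) := by
    rw [hmap, Gs_max1 (dsl p s).length _ le_rfl]
  unfold solution_alt
  cases hz : p.zip s with
  | nil =>
    rw [goB, if_neg (by omega)]
    rw [← hGs, hz]
    simp [Gs]
  | cons x l =>
    have hx : 100 ≤ x.1 ∨ 0 < x.2 := h x (by rw [hz]; simp)
    have h' : ∀ y ∈ l, 100 ≤ y.1 ∨ 0 < y.2 := fun y hy => h y (by rw [hz]; simp [hy])
    have hd1 : 1 ≤ dN x := by unfold dN; omega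
    rw [goB]
    simp only [dB_eq hx]
    rw [if_pos (by exact_mod_cast hd1), if_neg (by omega)]
    have h1 : (1 : Int) = (((1 : Nat)) : Int) := rfl
    rw [h1, goB_spec l (dN x) 1 [] h' hd1 le_rfl]
    rw [← hGs, hz, List.map_cons, Gs_cons_dN]
    push_cast
    simp

theorem solution_spec : Claim_equal_solution := by
  intro p s _hdom hpre
  obtain ⟨hlen, h⟩ := hpre
  unfold Spec_solution
  unfold solution
  rw [loopA_loopD (fuelA p s) p s [] hlen h]
  have hfuel : (dsl p s).foldl max 0 < fuelA p s := by
    unfold fuelA dsl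
    omega
  rw [loopD_Gs (fuelA p s) (dsl p s) [] hfuel, List.nil_append]
  exact (alt_eq_Gs p s h).symm
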